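-- pv_equiv track=rewrite | github.com/edsq/pwg_testing_presentation | src/primes/__init__.py | get_iters1
-- ===== SOURCE A (Python) =====
-- def get_iters1(N):
--     """Like prime1, but return the number of iterations.
--
--     >>> get_iters1(40)
--     32
--     """
--     iter = 0
--     primes = list(range(2, N))
--     for p0 in primes:
--         p = p0**2
--         while p < N:
--             iter += 1
--             if p in primes:
--                 primes.remove(p)
--             p += p0
--     return iter
-- ===== SOURCE B (Python) =====
-- def get_iters1(N):
--     """Like prime1, but return the number of iterations.
--
--     Closed form: for each prime p whose square is below N, count its
--     relevant multiples directly instead of simulating the sieve.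
--     """
--     total = 0
--     m = 1
--     while (m + 1) * (m + 1) < N:
--         m += 1
--     # m is now the largest integer whose square is below N, when any is
--     for p in range(2, m + 1):
--         if all(p % d != 0 for d in range(2, p)):
--             total += (N - 1 - p * p) // p + 1
--     return total
-- ===== Notes on version B (the rewrite author's own statement) =====
-- stated objective: faster
-- what changed: Instead of simulating the sieve on a shrinking list (with linear membership tests and removals), B sums a closed-form iteration count over the primes below the square root of N, found by trial division.
import Mathlib
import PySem

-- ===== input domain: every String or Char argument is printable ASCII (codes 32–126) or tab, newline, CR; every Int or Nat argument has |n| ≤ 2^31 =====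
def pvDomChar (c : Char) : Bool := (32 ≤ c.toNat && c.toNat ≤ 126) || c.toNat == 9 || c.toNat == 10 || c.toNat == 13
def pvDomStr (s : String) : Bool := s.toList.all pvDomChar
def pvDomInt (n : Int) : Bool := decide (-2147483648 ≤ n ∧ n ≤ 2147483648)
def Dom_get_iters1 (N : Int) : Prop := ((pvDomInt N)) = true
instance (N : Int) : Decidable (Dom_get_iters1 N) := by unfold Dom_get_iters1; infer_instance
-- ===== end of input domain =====

-- B replaces A's mutating-list sieve simulation by a closed-form sum of the inner-loop
-- counts over the primes below the square root of N (objective: faster).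

-- ===== PORT A =====
def pvRemoveIfMem (p : Int) (L : List Int) : List Int :=
  if L.contains p then (PySem.List.remove? L p).getD L else L

-- fuel = (N - p).toNat steps always suffice for the inner `while p < N` loop (p grows by
-- p0 ≥ 2 each step), and fuel = initial list length for the outer `for` loop; the fuel is
-- only a totality device, the branch structure is A's.
def pvInner : Nat → Int → Int → Int → List Int → Int → List Int × Int
  | 0, _, _, _, L, it => (L, it)
  | fuel + 1, N, p0, p, L, it =>
    if p < N then pvInner fuel N p0 (p + p0) (pvRemoveIfMem p L) (it + 1) else (L, it)

def pvOuter : Nat → Int → Nat → List Int → Int → Int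
  | 0, _, _, _, it => it
  | fuel + 1, N, i, L, it =>
    if h : i < L.length then
      pvOuter fuel N (i + 1) (pvInner (N - L[i] * L[i]).toNat N L[i] (L[i] * L[i]) L it).1
        (pvInner (N - L[i] * L[i]).toNat N L[i] (L[i] * L[i]) L it).2
    else it

def get_iters1 (N : Int) : Int :=
  pvOuter (PySem.List.pyRange 2 N 1).length N 0 (PySem.List.pyRange 2 N 1) 0

-- ===== PORT B =====
def pvIsPrimeB (p : Int) : Bool :=
  (PySem.List.pyRange 2 p 1).all (fun d => PySem.Int.mod p d != 0)

-- fuel = N.toNat always suffices for the square-search while loop (m grows by one per step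
-- and the loop is left as soon as m + 1 reaches N, since (m+1)² ≥ m+1); fuel is only a totality device.
def pvFindM : Nat → Int → Int → Int
  | 0, _, m => m
  | fuel + 1, N, m => if (m + 1) * (m + 1) < N then pvFindM fuel N (m + 1) else m

def get_iters1_alt (N : Int) : Int :=
  (PySem.List.pyRange 2 (pvFindM N.toNat N 1 + 1) 1).foldl
    (fun total p =>
      if pvIsPrimeB p then total + (PySem.Int.floordiv (N - 1 - p * p) p + 1) else total)
    0

-- ===== PRECONDITION & SPEC =====
def Spec_get_iters1 (N : Int) (out : Int) : Prop := out = get_iters1_alt N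
instance (N : Int) (out : Int) : Decidable (Spec_get_iters1 N out) := by unfold Spec_get_iters1; infer_instance

-- ===== CLAIM (what is proved, stated in full; the proofs are below) =====
def Claim_equal_get_iters1 : Prop := ∀ (N : Int), Dom_get_iters1 N → Spec_get_iters1 N (get_iters1 N)

-- ===== LEMMAS AND PROOFS =====
def pvCnt (N p0 p : Int) : Int :=
  if 0 < p0 ∧ p < N then pvCnt N p0 (p + p0) + 1 else 0
termination_by (N - p).toNat
decreasing_by rename_i h; omega

def pvGood (N : Int) (P : List Int) (n : Int) : Prop :=
  2 ≤ n ∧ n < N ∧ ∀ q ∈ P, ¬(q * q ≤ n ∧ q ∣ n)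

theorem pvCnt_eq (N p0 p : Int) (h0 : 0 < p0) (hp : p < N) :
    pvCnt N p0 p = (N - 1 - p) / p0 + 1 := by
  fun_induction pvCnt with
  | case1 p h ih =>
    by_cases h2 : p + p0 < N
    · rw [ih h2]
      have : N - 1 - p = (N - 1 - (p + p0)) + 1 * p0 := by ring
      rw [this, Int.add_mul_ediv_right _ _ (by omega : p0 ≠ 0)]
    · have hz : pvCnt N p0 (p + p0) = 0 := by
        unfold pvCnt; rw [if_neg]; omega
      rw [hz]
      have : (N - 1 - p) / p0 = 0 := Int.ediv_eq_zero_of_lt (by omega) (by omega)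
      omega
  | case2 p h => exact absurd ⟨h0, hp⟩ h

theorem pvInner_base (N p0 p : Int) (L : List Int) (hp : N ≤ p) :
    L.filter (fun n => !decide (p ≤ n ∧ n < N ∧ p0 ∣ (n - p))) = L := by
  rw [List.filter_eq_self]
  intro n _
  simp only [Bool.not_eq_eq_eq_not, Bool.not_true, decide_eq_false_iff_not]
  omega

theorem pvInner_spec (fuel : Nat) : ∀ (N p0 p : Int) (L : List Int) (it : Int),
    0 < p0 → L.Nodup → (N - p).toNat ≤ fuel →
    pvInner fuel N p0 p L it =
      (L.filter (fun n => !decide (p ≤ n ∧ n < N ∧ p0 ∣ (n - p))), it + pvCnt N p0 p) := by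
  induction fuel with
  | zero =>
    intro N p0 p L it h0 hnd hfu
    rw [pvInner, pvInner_base N p0 p L (by omega), pvCnt, if_neg (by omega)]
    simp
  | succ fuel IH =>
    intro N p0 p L it h0 hnd hfu
    rw [pvInner]
    split
    · rename_i hpN
      have h : 0 < p0 ∧ p < N := ⟨h0, hpN⟩
      have hnd' : (pvRemoveIfMem p L).Nodup := by
        unfold pvRemoveIfMem
        split
        · rw [PySem.List.remove?_eq_some_erase L p (by simpa using (by assumption : L.contains p = true))]
          simpa using hnd.erase p
        · exact hnd
      rw [IH N p0 (p + p0) (pvRemoveIfMem p L) (it + 1) h0 hnd' (by omega)]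
      have hcnt : pvCnt N p0 p = pvCnt N p0 (p + p0) + 1 := by
        rw [pvCnt, if_pos h]
      refine Prod.ext ?_ (by simp; omega)
      simp only
      have key : ∀ n ∈ L, n ≠ p →
          (!decide ((p + p0) ≤ n ∧ n < N ∧ p0 ∣ (n - (p + p0)))) =
          (!decide (p ≤ n ∧ n < N ∧ p0 ∣ (n - p))) := by
        intro n _ hne
        congr 1
        rw [decide_eq_decide]
        have hiff : p0 ∣ (n - (p + p0)) ↔ p0 ∣ (n - p) := by
          constructor <;> intro hd
          · have h2 := dvd_add hd (dvd_refl p0)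
            have : n - (p + p0) + p0 = n - p := by ring
            rwa [this] at h2
          · have h2 := dvd_sub hd (dvd_refl p0)
            have : n - p - p0 = n - (p + p0) := by ring
            rwa [this] at h2
        constructor
        · rintro ⟨h1, h2, h3⟩
          exact ⟨by omega, h2, hiff.mp h3⟩
        · rintro ⟨h1, h2, h3⟩
          have hlt : p < n := lt_of_le_of_ne h1 (Ne.symm hne)
          have := Int.le_of_dvd (show (0:ℤ) < n - p by omega) h3
          exact ⟨by omega, h2, hiff.mpr h3⟩
      unfold pvRemoveIfMem
      split
      · rename_i hc
        rw [PySem.List.remove?_eq_some_erase L p (by simpa using hc), Option.getD_some,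
          hnd.erase_eq_filter p, List.filter_filter]
        refine List.filter_congr ?_
        intro n hn
        by_cases hne : n = p
        · subst hne
          simp [h.2]
        · rw [key n hn hne]
          simp [bne, hne]
      · rename_i hc
        refine List.filter_congr ?_
        intro n hn
        have hne : n ≠ p := by
          intro he; subst he; exact hc (by simpa using hn)
        exact key n hn hne
    · rename_i hpN
      rw [pvInner_base N p0 p L (by omega), pvCnt, if_neg (by omega)]
      simp

def pvPP (N : Int) : Finset Int :=
  ((PySem.List.pyRange 2 N 1).filter (fun p => Nat.Prime p.natAbs)).toFinset

theorem mem_pvPP {N x : Int} : x ∈ pvPP N ↔ (2 ≤ x ∧ x < N) ∧ Nat.Prime x.natAbs := by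
  simp [pvPP, List.mem_filter, PySem.List.mem_pyRange_one]

theorem pv_dvd_eq_self (r q : Int) (hr : 2 ≤ r) (hq : Prime q) (h0 : 0 < q) (hd : r ∣ q) : r = q := by
  have h1 : r.natAbs ∣ q.natAbs := Int.natAbs_dvd_natAbs.mpr hd
  have hqp : Nat.Prime q.natAbs := Int.prime_iff_natAbs_prime.mp hq
  rcases hqp.eq_one_or_self_of_dvd _ h1 with h' | h' <;> omega

theorem pvPP_empty (N : Int) (L : List Int)
    (hmem : ∀ n : Int, n ∈ L ↔ pvGood N L n) : pvPP N \ L.toFinset = ∅ := by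
  rw [Finset.sdiff_eq_empty_iff_subset]
  intro p hp
  rw [mem_pvPP] at hp
  obtain ⟨⟨hp2, hpN⟩, hpp'⟩ := hp
  have hpp : Prime p := Int.prime_iff_natAbs_prime.mpr hpp'
  rw [List.mem_toFinset]
  apply (hmem p).mpr
  refine ⟨hp2, hpN, ?_⟩
  intro q hq hc
  have hq2 : 2 ≤ q := ((hmem q).mp hq).1
  have : q = p := pv_dvd_eq_self q p hq2 hpp (by omega) hc.2
  subst this
  nlinarith [hc.1]

theorem pv_take_lt (L : List Int) (hs : List.Sorted (· < ·) L) (i : Nat) (hi : i < L.length)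
    (q : Int) (hq : q ∈ L.take i) : q < L[i] := by
  obtain ⟨j, hj, rfl⟩ := List.getElem_of_mem hq
  have hji : j < i := by simp [List.length_take] at hj; omega
  rw [List.getElem_take]
  exact List.pairwise_iff_getElem.mp hs j i (by omega) hi hji

theorem pv_mem_take (L : List Int) (hs : List.Sorted (· < ·) L) (i : Nat) (hi : i < L.length)
    (x : Int) (hx : x ∈ L) (hlt : x < L[i]) : x ∈ L.take i := by
  obtain ⟨j, hj, rfl⟩ := List.getElem_of_mem hx
  have hji : j < i := by
    by_contra hc
    push_neg at hc
    rcases lt_or_eq_of_le hc with h' | h'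
    · exact absurd (List.pairwise_iff_getElem.mp hs i j hi hj h') (by omega)
    · subst h'; exact absurd hlt (lt_irrefl _)
  have hjt : j < (L.take i).length := by simp [List.length_take]; omega
  have hmem := List.getElem_mem hjt
  rwa [List.getElem_take] at hmem

theorem pvGood_append (N : Int) (A : List Int) (b n : Int) :
    pvGood N (A ++ [b]) n ↔ pvGood N A n ∧ ¬(b * b ≤ n ∧ b ∣ n) := by
  unfold pvGood
  constructor
  · rintro ⟨h1, h2, h3⟩
    exact ⟨⟨h1, h2, fun q hq => h3 q (by simp [hq])⟩, h3 b (by simp)⟩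
  · rintro ⟨⟨h1, h2, h3⟩, h4⟩
    refine ⟨h1, h2, ?_⟩
    intro q hq
    rcases List.mem_append.mp hq with h' | h'
    · exact h3 q h'
    · rw [List.mem_singleton.mp h']
      exact h4

theorem pvOuter_spec (N : Int) (fuel : Nat) : ∀ (i : Nat) (L : List Int) (it : Int),
    L.length - i ≤ fuel →
    List.Sorted (· < ·) L →
    (∀ n : Int, n ∈ L ↔ pvGood N (L.take i) n) →
    pvOuter fuel N i L it = it + ∑ p ∈ pvPP N \ (L.take i).toFinset, pvCnt N p (p * p) := by
  induction fuel with
  | zero =>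
    intro i L it hf hs hmem
    rw [List.take_of_length_le (by omega)] at hmem
    have hempty : pvPP N \ L.toFinset = ∅ := pvPP_empty N L hmem
    rw [pvOuter, List.take_of_length_le (by omega), hempty]
    simp
  | succ f IH =>
    intro i L it hf hs hmem
    by_cases hi : i < L.length
    · rw [pvOuter, dif_pos hi]
      have hp0L : L[i] ∈ L := List.getElem_mem hi
      obtain ⟨hg2, hgN, _⟩ := (hmem _).mp hp0L
      have hnd : L.Nodup := List.Pairwise.nodup hs
      -- L[i] is prime
      have hp0prime : Prime L[i] := by
        by_contra hnp
        have haL : ((L[i].natAbs : Int)) = L[i] := Int.natAbs_of_nonneg (by omega)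
        have hnpa : ¬ L[i].natAbs.Prime := fun hp => hnp (Int.prime_iff_natAbs_prime.mpr hp)
        have hqp : L[i].natAbs.minFac.Prime := Nat.minFac_prime (by omega)
        have hqd : L[i].natAbs.minFac ∣ L[i].natAbs := Nat.minFac_dvd _
        have hqsq : L[i].natAbs.minFac * L[i].natAbs.minFac ≤ L[i].natAbs := by
          have := Nat.minFac_sq_le_self (by omega) hnpa
          simpa [pow_two] using this
        have hQd : (L[i].natAbs.minFac : Int) ∣ L[i] := by
          rw [← haL]; exact_mod_cast hqd
        have hQsq : (L[i].natAbs.minFac : Int) * (L[i].natAbs.minFac : Int) ≤ L[i] := by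
          rw [← haL]; exact_mod_cast hqsq
        have hQ2 : (2 : Int) ≤ (L[i].natAbs.minFac : Int) := by exact_mod_cast hqp.two_le
        have hQprime : Prime ((L[i].natAbs.minFac : Int)) :=
          Int.prime_iff_natAbs_prime.mpr (by simpa using hqp)
        have hQlt : (L[i].natAbs.minFac : Int) < L[i] := by nlinarith
        have hQtake : (L[i].natAbs.minFac : Int) ∈ L.take i := by
          by_cases hqt : (L[i].natAbs.minFac : Int) ∈ L.take i
          · exact hqt
          · have hqL : (L[i].natAbs.minFac : Int) ∈ L := by
              apply (hmem _).mpr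
              refine ⟨hQ2, by omega, ?_⟩
              intro r hr hc
              have hr2 : 2 ≤ r := ((hmem r).mp (List.take_subset _ _ hr)).1
              have : r = (L[i].natAbs.minFac : Int) :=
                pv_dvd_eq_self r _ hr2 hQprime (by omega) hc.2
              exact hqt (this ▸ hr)
            exact pv_mem_take L hs i hi _ hqL hQlt
        exact ((hmem _).mp hp0L).2.2 _ hQtake ⟨hQsq, hQd⟩
      -- rewrite the inner loop
      rw [pvInner_spec (N - L[i] * L[i]).toNat N L[i] (L[i] * L[i]) L it (by omega) hnd le_rfl]
      set pred : Int → Bool :=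
        fun n => !decide (L[i] * L[i] ≤ n ∧ n < N ∧ L[i] ∣ (n - L[i] * L[i])) with hpred
      have hsq2 : L[i] < L[i] * L[i] := by nlinarith
      have htakelt : ∀ q ∈ L.take i, q < L[i] := fun q hq => pv_take_lt L hs i hi q hq
      -- split L and compute the filter
      have hsplit : L = L.take i ++ L[i] :: L.drop (i + 1) := by
        rw [← List.drop_eq_getElem_cons hi, List.take_append_drop]
      have hft : (L.take i).filter pred = L.take i := by
        rw [List.filter_eq_self]
        intro a ha
        have := htakelt a ha
        simp only [hpred, Bool.not_eq_eq_eq_not, Bool.not_true, decide_eq_false_iff_not]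
        intro hcon
        have := hcon.1
        omega
      have hfp0 : pred L[i] = true := by
        simp only [hpred, Bool.not_eq_eq_eq_not, Bool.not_true, decide_eq_false_iff_not]
        intro hcon
        have := hcon.1
        omega
      have hfilter : L.filter pred = L.take i ++ L[i] :: (L.drop (i + 1)).filter pred := by
        conv_lhs => rw [hsplit]
        rw [List.filter_append, hft, List.filter_cons, if_pos hfp0]
      have hlen' : (L.filter pred).length ≤ L.length := List.length_filter_le _ _
      have htaketake : (L.filter pred).take (i + 1) = L.take i ++ [L[i]] := by
        rw [hfilter, List.take_append, List.take_of_length_le (by simp [List.length_take])]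
        have hlt : (L.take i).length = i := by simp [List.length_take]; omega
        rw [hlt]
        simp
      have hs' : List.Sorted (· < ·) (L.filter pred) := hs.filter pred
      have hmem' : ∀ n : Int, n ∈ L.filter pred ↔ pvGood N ((L.filter pred).take (i + 1)) n := by
        intro n
        rw [htaketake, pvGood_append, List.mem_filter, hmem n]
        constructor
        · rintro ⟨hg, hp⟩
          refine ⟨hg, ?_⟩
          simp only [hpred, Bool.not_eq_eq_eq_not, Bool.not_true, decide_eq_false_iff_not] at hp
          rintro ⟨hle, hdvd⟩
          apply hp
          refine ⟨hle, hg.2.1, ?_⟩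
          exact dvd_sub hdvd (Dvd.intro _ rfl)
        · rintro ⟨hg, hnd2⟩
          refine ⟨hg, ?_⟩
          simp only [hpred, Bool.not_eq_eq_eq_not, Bool.not_true, decide_eq_false_iff_not]
          rintro ⟨hle, hltN, hdvd⟩
          apply hnd2
          refine ⟨hle, ?_⟩
          have := dvd_add hdvd (Dvd.intro L[i] rfl : L[i] ∣ L[i] * L[i])
          simpa using this
      have hrec := IH (i + 1) (L.filter pred) (it + pvCnt N L[i] (L[i] * L[i]))
        (by omega) hs' hmem'
      rw [hrec, htaketake]
      -- sum bookkeeping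
      have hp0PP : L[i] ∈ pvPP N :=
        mem_pvPP.mpr ⟨⟨hg2, hgN⟩, Int.prime_iff_natAbs_prime.mp hp0prime⟩
      have hp0T : L[i] ∉ (L.take i).toFinset := by
        rw [List.mem_toFinset]
        intro hmem2
        exact absurd (htakelt _ hmem2) (lt_irrefl _)
      have hset : pvPP N \ (L.take i ++ [L[i]]).toFinset =
          (pvPP N \ (L.take i).toFinset).erase L[i] := by
        ext x
        simp only [Finset.mem_sdiff, Finset.mem_erase, List.toFinset_append, Finset.mem_union,
          List.toFinset_cons, List.toFinset_nil, insert_empty_eq, Finset.mem_insert,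
          Finset.mem_singleton, List.mem_toFinset]
        tauto
      rw [hset]
      rw [← Finset.add_sum_erase (pvPP N \ (L.take i).toFinset)
        (fun p => pvCnt N p (p * p)) (Finset.mem_sdiff.mpr ⟨hp0PP, hp0T⟩)]
      ring
    · rw [List.take_of_length_le (by omega)] at hmem
      have hempty : pvPP N \ L.toFinset = ∅ := pvPP_empty N L hmem
      rw [pvOuter, dif_neg hi, List.take_of_length_le (by omega), hempty]
      simp

theorem get_iters1_eq_sum (N : Int) :
    get_iters1 N = ∑ p ∈ pvPP N, pvCnt N p (p * p) := by
  unfold get_iters1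
  have hs : List.Sorted (· < ·) (PySem.List.pyRange 2 N 1) :=
    PySem.List.pairwise_lt_pyRange_one 2 N
  have hmem : ∀ n : Int, n ∈ PySem.List.pyRange 2 N 1 ↔
      pvGood N ((PySem.List.pyRange 2 N 1).take 0) n := by
    intro n
    simp [PySem.List.mem_pyRange_one, pvGood]
  rw [pvOuter_spec N (PySem.List.pyRange 2 N 1).length 0 (PySem.List.pyRange 2 N 1) 0
    (by omega) hs hmem]
  simp

theorem pvIsPrimeB_iff (p : Int) (h2 : 2 ≤ p) :
    pvIsPrimeB p = true ↔ Nat.Prime p.natAbs := by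
  unfold pvIsPrimeB
  rw [List.all_eq_true]
  constructor
  · intro h
    rw [Nat.prime_def_lt]
    refine ⟨by omega, ?_⟩
    intro m hm hmd
    by_contra hm1
    have hm0 : m ≠ 0 := by
      intro h0
      rw [h0] at hmd
      have := Nat.eq_zero_of_zero_dvd hmd
      omega
    have hmem : (m : Int) ∈ PySem.List.pyRange 2 p 1 := by
      rw [PySem.List.mem_pyRange_one]
      omega
    have hne := h _ hmem
    simp only [bne_iff_ne, ne_eq] at hne
    apply hne
    rw [PySem.Int.mod_eq_zero_iff_dvd]
    have hd : (m : Int) ∣ (p.natAbs : Int) := Int.natCast_dvd_natCast.mpr hmd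
    have hpn : ((p.natAbs : Int)) = p := Int.natAbs_of_nonneg (by omega)
    rwa [hpn] at hd
  · intro hp d hd
    rw [PySem.List.mem_pyRange_one] at hd
    simp only [bne_iff_ne, ne_eq]
    rw [PySem.Int.mod_eq_zero_iff_dvd]
    intro hdvd
    have hd' : d.natAbs ∣ p.natAbs := Int.natAbs_dvd_natAbs.mpr hdvd
    rcases hp.eq_one_or_self_of_dvd _ hd' with h' | h' <;> omega

theorem pvFindM_spec (N : Int) (fuel : Nat) : ∀ (m : Int), 1 ≤ m → (N - 1 - m).toNat ≤ fuel →
    1 ≤ pvFindM fuel N m ∧ (pvFindM fuel N m = m ∨ pvFindM fuel N m * pvFindM fuel N m < N) ∧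
      N ≤ (pvFindM fuel N m + 1) * (pvFindM fuel N m + 1) := by
  induction fuel with
  | zero =>
    intro m h1 hfu
    rw [pvFindM]
    exact ⟨h1, Or.inl rfl, by nlinarith [Int.toNat_eq_zero.mp (by omega : (N - 1 - m).toNat = 0)]⟩
  | succ fuel IH =>
    intro m h1 hfu
    rw [pvFindM]
    split
    · rename_i hlt
      have hmN : m + 1 < N := by nlinarith
      obtain ⟨ih1, ih2, ih3⟩ := IH (m + 1) (by omega) (by omega)
      refine ⟨ih1, ?_, ih3⟩
      rcases ih2 with h' | h'
      · right; rw [h']; exact hlt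
      · right; exact h'
    · rename_i hge
      exact ⟨h1, Or.inl rfl, by omega⟩

theorem pv_foldl_if (g : Int → Int) (c : Int → Bool) :
    ∀ (l : List Int) (a : Int),
      l.foldl (fun t p => if c p then t + g p else t) a = a + ((l.filter c).map g).sum := by
  intro l
  induction l with
  | nil => simp
  | cons x xs ih =>
    intro a
    rw [List.foldl_cons, List.filter_cons]
    by_cases hc : c x
    · rw [if_pos hc, if_pos hc, ih, List.map_cons, List.sum_cons]
      ring
    · rw [if_neg (by simp [hc]), if_neg (by simp [hc]), ih]

theorem get_iters1_alt_eq (N : Int) :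
    get_iters1_alt N = ∑ p ∈ pvPP N, pvCnt N p (p * p) := by
  unfold get_iters1_alt
  obtain ⟨hm1, hmor, hmub⟩ := pvFindM_spec N N.toNat 1 le_rfl (by omega)
  rw [pv_foldl_if (fun p => PySem.Int.floordiv (N - 1 - p * p) p + 1) pvIsPrimeB]
  simp only [zero_add]
  have hnd : ((PySem.List.pyRange 2 (pvFindM N.toNat N 1 + 1) 1).filter pvIsPrimeB).Nodup :=
    (PySem.List.nodup_pyRange_one 2 (pvFindM N.toNat N 1 + 1)).filter _
  rw [← List.sum_toFinset _ hnd]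
  have hmem_s : ∀ x : Int,
      x ∈ ((PySem.List.pyRange 2 (pvFindM N.toNat N 1 + 1) 1).filter pvIsPrimeB).toFinset ↔
        (2 ≤ x ∧ x ≤ pvFindM N.toNat N 1) ∧ pvIsPrimeB x = true := by
    intro x
    rw [List.mem_toFinset, List.mem_filter, PySem.List.mem_pyRange_one]
    constructor
    · rintro ⟨⟨ha, hb⟩, hcc⟩; exact ⟨⟨ha, by omega⟩, hcc⟩
    · rintro ⟨⟨ha, hb⟩, hcc⟩; exact ⟨⟨ha, by omega⟩, hcc⟩
  have hmm : ∀ x : Int, 2 ≤ x → x ≤ pvFindM N.toNat N 1 → x * x < N := by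
    intro x hx2 hxm
    rcases hmor with h' | h'
    · omega
    · nlinarith
  have hsub : ((PySem.List.pyRange 2 (pvFindM N.toNat N 1 + 1) 1).filter pvIsPrimeB).toFinset ⊆ pvPP N := by
    intro x hx
    rw [hmem_s] at hx
    obtain ⟨⟨hx2, hxm⟩, hxp⟩ := hx
    have hxx := hmm x hx2 hxm
    refine mem_pvPP.mpr ⟨⟨hx2, by nlinarith⟩, (pvIsPrimeB_iff x hx2).mp hxp⟩
  have hzero : ∀ x ∈ pvPP N,
      x ∉ ((PySem.List.pyRange 2 (pvFindM N.toNat N 1 + 1) 1).filter pvIsPrimeB).toFinset →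
        pvCnt N x (x * x) = 0 := by
    intro x hx hxs
    obtain ⟨⟨hx2, hxN⟩, hxp⟩ := mem_pvPP.mp hx
    rw [hmem_s] at hxs
    have hxm : ¬ x ≤ pvFindM N.toNat N 1 := by
      intro hle
      exact hxs ⟨⟨hx2, hle⟩, (pvIsPrimeB_iff x hx2).mpr hxp⟩
    have : (pvFindM N.toNat N 1 + 1) * (pvFindM N.toNat N 1 + 1) ≤ x * x := by nlinarith
    rw [pvCnt, if_neg]
    intro hc
    have := hc.2
    omega
  rw [Finset.sum_congr rfl (fun x hx => ?_), Finset.sum_subset hsub hzero]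
  rw [hmem_s] at hx
  obtain ⟨⟨hx2, hxm⟩, _⟩ := hx
  have hxx := hmm x hx2 hxm
  rw [pvCnt_eq N x (x * x) (by omega) hxx, PySem.Int.floordiv_eq_ediv_of_pos (by omega)]

theorem pv_main (N : Int) : get_iters1 N = get_iters1_alt N := by
  rw [get_iters1_eq_sum, get_iters1_alt_eq]

-- ===== VERDICT (by name: the statement is the Claim_ definition above) =====
theorem get_iters1_spec : Claim_equal_get_iters1 := by
  intro N _
  unfold Spec_get_iters1
  exact pv_main N
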